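-- pv_equiv track=rewrite | github.com/lexust1/code4fun | Python/mfti_algos/lec09_sorting_contest/ex04_money.py | count_money
-- ===== SOURCE A (Python) =====
-- def count_money(arr: list) -> int:
--     """
--     Calculates the total amount of money earned over a certain number
--     of days.
--
--     Parameters:
--     - arr (list): A list containing three elements: the initial price
--         per day (price), the increase in price per day (delta), and the
--         number of weeks to calculate (weeks).
--
--     Returns:
--     - int: The total amount of money earned over the specified number
--         of weeks.
--     """
--     price = arr[0]
--     delta = arr[1]
--     days = arr[2] * 7
--     cnt = 0
--     money = 0
--     while days > 0:
--         money += price + cnt * delta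
--         cnt += 1
--         days -= 1
--     return int(money)
-- ===== SOURCE B (Python) =====
-- def count_money(arr: list) -> int:
--     price = arr[0]
--     delta = arr[1]
--     days = arr[2] * 7
--     if days <= 0:
--         return 0
--     return int(days * price + delta * days * (days - 1) // 2)
-- ===== Notes on version B (the rewrite author's own statement) =====
-- stated objective: faster
-- what changed: Replaced the day-by-day accumulation loop with the closed-form arithmetic-series formula days*price + delta*days*(days-1)//2.
import Mathlib
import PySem

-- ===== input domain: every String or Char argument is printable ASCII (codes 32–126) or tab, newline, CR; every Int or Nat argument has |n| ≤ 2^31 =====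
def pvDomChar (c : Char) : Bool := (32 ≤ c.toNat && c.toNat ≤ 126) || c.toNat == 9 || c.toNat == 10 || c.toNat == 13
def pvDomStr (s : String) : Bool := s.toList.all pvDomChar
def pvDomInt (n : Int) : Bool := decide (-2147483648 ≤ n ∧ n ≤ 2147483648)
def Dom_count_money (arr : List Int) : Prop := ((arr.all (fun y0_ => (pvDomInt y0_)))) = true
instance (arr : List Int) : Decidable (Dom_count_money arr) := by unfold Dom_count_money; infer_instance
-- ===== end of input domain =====

-- B replaces A's day-by-day loop with the closed-form arithmetic-series formula (faster).

-- ===== PORT A =====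
-- the while-loop of A: fuel = remaining days (days > 0 ↔ fuel successor)
def cmLoop (price delta : Int) : Nat → Int → Int → Int
  | 0, _, money => money
  | n + 1, cnt, money => cmLoop price delta n (cnt + 1) (money + (price + cnt * delta))

def count_money (arr : List Int) : Int :=
  let price := (PySem.List.pyGet? arr 0).getD 0
  let delta := (PySem.List.pyGet? arr 1).getD 0
  let days := (PySem.List.pyGet? arr 2).getD 0 * 7
  cmLoop price delta days.toNat 0 0

-- ===== PORT B =====
def count_money_alt (arr : List Int) : Int :=
  let price := (PySem.List.pyGet? arr 0).getD 0
  let delta := (PySem.List.pyGet? arr 1).getD 0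
  let days := (PySem.List.pyGet? arr 2).getD 0 * 7
  if days ≤ 0 then 0
  else days * price + PySem.Int.floordiv (delta * days * (days - 1)) 2

-- ===== PRECONDITION & SPEC =====
-- A raises IndexError when arr has fewer than 3 elements; B does too, so those inputs are excluded.
def Pre_count_money (arr : List Int) : Prop := 3 ≤ arr.length
instance (arr : List Int) : Decidable (Pre_count_money arr) := by unfold Pre_count_money; infer_instance
def pvWitness_count_money : List Int := ([5, 2, 3])

def Spec_count_money (arr : List Int) (out : Int) : Prop := out = count_money_alt arr
instance (arr : List Int) (out : Int) : Decidable (Spec_count_money arr out) := by unfold Spec_count_money; infer_instance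

-- ===== CLAIM (what is proved, stated in full; the proofs are below) =====
def Claim_equal_count_money : Prop := ∀ (arr : List Int), Dom_count_money arr → Pre_count_money arr → Spec_count_money arr (count_money arr)

-- ===== LEMMAS AND PROOFS =====

-- running value of the loop: money + n*price + delta * (cnt + (cnt+1) + … + (cnt+n-1))
def triSum (n : Nat) (cnt : Int) : Int :=
  match n with
  | 0 => 0
  | n + 1 => cnt + triSum n (cnt + 1)

theorem cmLoop_eq (price delta : Int) (n : Nat) (cnt money : Int) :
    cmLoop price delta n cnt money = money + n * price + delta * triSum n cnt := by
  induction n generalizing cnt money with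
  | zero => simp [cmLoop, triSum]
  | succ n ih =>
    simp only [cmLoop, triSum, ih]
    push_cast
    ring

theorem triSum_two_mul (n : Nat) (cnt : Int) :
    2 * triSum n cnt = n * (2 * cnt + n - 1) := by
  induction n generalizing cnt with
  | zero => simp [triSum]
  | succ n ih =>
    simp only [triSum]
    have := ih (cnt + 1)
    push_cast
    push_cast at this
    nlinarith [this]

-- ===== VERDICT (by name: the statement is the Claim_ definition above) =====
theorem count_money_spec : Claim_equal_count_money := by
  intro arr _ _
  unfold Spec_count_money count_money count_money_alt
  set price := (PySem.List.pyGet? arr 0).getD 0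
  set delta := (PySem.List.pyGet? arr 1).getD 0
  set days := (PySem.List.pyGet? arr 2).getD 0 * 7 with hdays
  by_cases h : days ≤ 0
  · have : days.toNat = 0 := Int.toNat_of_nonpos h
    simp [h, this, cmLoop]
  · push Not at h
    have hn : (days.toNat : Int) = days := Int.toNat_of_nonneg (le_of_lt h)
    rw [cmLoop_eq]
    have ht : 2 * triSum days.toNat 0 = days * (days - 1) := by
      have := triSum_two_mul days.toNat 0
      rw [hn] at this
      linarith
    have hfd : PySem.Int.floordiv (delta * days * (days - 1)) 2 = delta * triSum days.toNat 0 := by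
      have : delta * days * (days - 1) = delta * triSum days.toNat 0 * 2 := by linear_combination (-delta) * ht
      rw [this, PySem.Int.floordiv_eq_ediv_of_pos (by norm_num)]
      exact Int.mul_ediv_cancel _ (by norm_num)
    rw [if_neg (not_le.mpr h), hfd, hn]
    ring
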